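-- pv_equiv track=rewrite | github.com/shinaaaa/coding_test | Programmers/72410/solution.py | degree_3
-- ===== SOURCE A (Python) =====
-- def degree_3(text):
--     arr = []
--     index = -1
--     size = len(text) - 1
--     for i in range(size):
--         if text[i] == '.':
--             if i == 0:
--                 index = 0
--             else:
--                 if index + 1 == i:
--                     arr.append(i)
--                 index = i
--
--     index = 0
--     for i in range(len(arr)):
--         text.pop(arr[i] - index)
--         index = index + 1
--
--     return text
-- ===== SOURCE B (Python) =====
-- def degree_3(text):
--     n = len(text)
--     result = []
--     for i in range(n):
--         if not (text[i] == '.' and 1 <= i <= n - 2 and text[i - 1] == '.'):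
--             result.append(text[i])
--     text[:] = result
--     return text
-- ===== Notes on version B (the rewrite author's own statement) =====
-- stated objective: simpler
-- what changed: A collects the indices of redundant interior dots in a first pass and then pops each of them from the list with a manually maintained offset; B does one forward pass that appends every element to a fresh result list unless it is a '.' at position 1..len-2 preceded by a '.', then writes the result back in place.
import Mathlib
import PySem

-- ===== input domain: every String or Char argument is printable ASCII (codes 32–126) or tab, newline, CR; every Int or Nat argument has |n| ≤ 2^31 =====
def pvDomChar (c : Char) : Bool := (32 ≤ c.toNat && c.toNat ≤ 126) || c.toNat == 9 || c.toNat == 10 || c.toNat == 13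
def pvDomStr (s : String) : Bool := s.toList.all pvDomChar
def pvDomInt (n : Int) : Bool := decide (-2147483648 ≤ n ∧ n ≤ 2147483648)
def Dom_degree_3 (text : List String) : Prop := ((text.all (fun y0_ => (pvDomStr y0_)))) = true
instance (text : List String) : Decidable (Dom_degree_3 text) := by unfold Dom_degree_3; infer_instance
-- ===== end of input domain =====

-- B replaces A's two-phase "collect removal indices, then pop each with a shifting offset" by a
-- single keep-building pass (objective: simpler). Both Pythons mutate `text` in place to the same
-- final content and return it; the equivalence proved here is about the returned value.

-- ===== PORT A =====
def degree_3 (text : List String) : List String :=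
  let size : Int := (text.length : Int) - 1
  let st :=
    (PySem.List.pyRange 0 size 1).foldl
      (fun (st : List Int × Int) i =>
        if PySem.List.pyGetD text i "" = "." then
          if i = 0 then (st.1, 0)
          else (if st.2 + 1 = i then st.1 ++ [i] else st.1, i)
        else st)
      ([], -1)
  let arr := st.1
  let st2 :=
    (PySem.List.pyRange 0 (arr.length : Int) 1).foldl
      (fun (st : List String × Int) i =>
        match PySem.List.pop? st.1 (PySem.List.pyGetD arr i 0 - st.2) with
        | some r => (r.2, st.2 + 1)
        | none => (st.1, st.2 + 1))
      (text, 0)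
  st2.1

-- ===== PORT B =====
def degree_3_alt (text : List String) : List String :=
  let n : Int := (text.length : Int)
  (PySem.List.pyRange 0 n 1).foldl
    (fun res i =>
      if ¬ (PySem.List.pyGetD text i "" = "." ∧ 1 ≤ i ∧ i ≤ n - 2 ∧
            PySem.List.pyGetD text (i - 1) "" = ".")
      then res ++ [PySem.List.pyGetD text i ""] else res)
    []

-- ===== PRECONDITION & SPEC =====
def Spec_degree_3 (text : List String) (out : List String) : Prop := out = degree_3_alt text
instance (text : List String) (out : List String) : Decidable (Spec_degree_3 text out) := by unfold Spec_degree_3; infer_instance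

-- ===== CLAIM (what is proved, stated in full; the proofs are below) =====
def Claim_equal_degree_3 : Prop := ∀ (text : List String), Dom_degree_3 text → Spec_degree_3 text (degree_3 text)

-- ===== LEMMAS AND PROOFS =====

/-- `text[i] == '.'` for a Nat index. -/
def pvDot (text : List String) (i : Nat) : Bool := decide (text.getD i "" = ".")

/-- Is index `i` one of the removed positions? (a '.' at i ≥ 1 whose predecessor is '.') -/
def pvRem (text : List String) (i : Nat) : Bool := pvDot text i && decide (1 ≤ i) && pvDot text (i - 1)

/-- The list of indices A's first loop collects. -/
def pvQs (text : List String) : List Nat := (List.range (text.length - 1)).filter (pvRem text)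

/-- The last index `j < m` with `text[j] == '.'`, or −1 (A's `index` variable). -/
def pvLastDot (text : List String) : Nat → Int
  | 0 => -1
  | m + 1 => if pvDot text m then (m : Int) else pvLastDot text m

/-- Keep the elements of `t` whose absolute position (starting at `j`) is not in `qs`. -/
def pvKeep (qs : List Nat) : Nat → List String → List String
  | _, [] => []
  | j, x :: xs => if j ∈ qs then pvKeep qs (j + 1) xs else x :: pvKeep qs (j + 1) xs

theorem pvLastDot_lt (text : List String) (m : Nat) : pvLastDot text m < (m : Int) := by
  induction m with
  | zero => simp [pvLastDot]
  | succ k ih =>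
    simp only [pvLastDot]
    split
    · push_cast; omega
    · push_cast at ih ⊢; omega

theorem pvLoop1 (text : List String) (m : Nat) :
    ((List.range m).map (fun (k : Nat) => (k : Int))).foldl
      (fun (st : List Int × Int) i =>
        if PySem.List.pyGetD text i "" = "." then
          if i = 0 then (st.1, 0)
          else (if st.2 + 1 = i then st.1 ++ [i] else st.1, i)
        else st)
      ([], -1)
    = (((List.range m).filter (pvRem text)).map (fun (k : Nat) => (k : Int)), pvLastDot text m) := by
  induction m with
  | zero => simp [pvLastDot]
  | succ m ih =>
    rw [List.range_succ, List.map_append, List.foldl_append, ih]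
    simp only [List.map_cons, List.map_nil, List.foldl_cons, List.foldl_nil,
      PySem.List.pyGetD_natCast]
    rw [List.filter_append, List.filter_singleton]
    by_cases hdot : text.getD m "" = "."
    · rw [if_pos hdot]
      have hdot' : text[m]?.getD "" = "." := by
        rw [← List.getD_eq_getElem?_getD]; exact hdot
      by_cases hm : m = 0
      · subst hm
        rw [if_pos (by norm_num)]
        simp [pvRem, pvDot, pvLastDot, hdot']
      · rw [if_neg (by exact_mod_cast hm)]
        have hiff : (pvLastDot text m + 1 = (m : Int)) ↔ pvDot text (m - 1) = true := by
          obtain ⟨k, rfl⟩ : ∃ k, m = k + 1 := ⟨m - 1, by omega⟩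
          simp only [pvLastDot, Nat.add_sub_cancel]
          split
          · simp_all
          · have := pvLastDot_lt text k
            constructor
            · intro h; push_cast at h; omega
            · simp_all
        have hrem : pvRem text m = (pvDot text (m - 1) : Bool) := by
          simp [pvRem, pvDot, hdot', Nat.one_le_iff_ne_zero, hm]
        by_cases hp : pvDot text (m - 1) = true
        · have hp' : text[m - 1]?.getD "" = "." := by
            rw [← List.getD_eq_getElem?_getD]
            simpa [pvDot] using hp
          rw [if_pos (hiff.mpr hp)]
          simp [pvLastDot, pvDot, hdot', hrem, hp']
        · have hp' : ¬(text[m - 1]?.getD "" = ".") := by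
            rw [← List.getD_eq_getElem?_getD]
            simpa [pvDot] using hp
          rw [if_neg (fun h => hp (hiff.mp h))]
          simp [pvLastDot, pvDot, hdot', hrem, hp']
    · rw [if_neg hdot]
      have hdot' : ¬(text[m]?.getD "" = ".") := by
        rw [← List.getD_eq_getElem?_getD]; exact hdot
      have : pvRem text m = false := by simp [pvRem, pvDot, hdot']
      simp [pvLastDot, pvDot, hdot', this]

theorem pvKeep_nil (qs : List Nat) (j : Nat) (t : List String) (h : ∀ q ∈ qs, False) :
    pvKeep qs j t = t := by
  induction t generalizing j with
  | nil => rfl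
  | cons x xs ih =>
    simp only [pvKeep]
    rw [if_neg (fun hm => h j hm), ih]

theorem pvKeep_cons_of_lt (q : Nat) (qs : List Nat) (j : Nat) (t : List String) (hq : q < j) :
    pvKeep (q :: qs) j t = pvKeep qs j t := by
  induction t generalizing j with
  | nil => rfl
  | cons x xs ih =>
    have hne : j ≠ q := by omega
    simp only [pvKeep, List.mem_cons, hne, false_or]
    rw [ih _ (by omega)]

theorem pvKeep_erase (q : Nat) (qs : List Nat) (k : Nat) (t : List String)
    (hk : k ≤ q) (hq : q - k < t.length) (hqs : ∀ x ∈ qs, q < x) :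
    pvKeep (q :: qs) k t = pvKeep qs (k + 1) (t.eraseIdx (q - k)) := by
  induction t generalizing k with
  | nil => simp at hq
  | cons x xs ih =>
    by_cases hkq : k = q
    · subst hkq
      have : k - k = 0 := by omega
      rw [this, List.eraseIdx_cons_zero]
      simp only [pvKeep, List.mem_cons, true_or, if_true]
      exact pvKeep_cons_of_lt _ _ _ _ (by omega)
    · have hlt : k < q := by omega
      have hmem : k ∉ q :: qs := by
        intro hx
        rcases List.mem_cons.mp hx with h | h
        · omega
        · exact absurd (hqs _ h) (by omega)
      have hk1 : k + 1 ∉ qs := fun hx => absurd (hqs _ hx) (by omega)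
      have hqk : q - k = (q - (k + 1)) + 1 := by omega
      rw [hqk, List.eraseIdx_cons_succ]
      simp only [pvKeep, if_neg hmem, if_neg hk1]
      rw [ih (k + 1) (by omega) (by simp at hq ⊢; omega)]

theorem pvPopFold (qs : List Nat) (t : List String) (k : Nat)
    (hp : qs.Pairwise (· < ·)) (hb : ∀ q ∈ qs, k ≤ q ∧ q - k < t.length) :
    (qs.foldl
      (fun (st : List String × Int) (q : Nat) =>
        match PySem.List.pop? st.1 ((q : Int) - st.2) with
        | some r => (r.2, st.2 + 1)
        | none => (st.1, st.2 + 1))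
      (t, (k : Int))).1 = pvKeep qs k t := by
  induction qs generalizing t k with
  | nil => exact (pvKeep_nil [] k t (by simp)).symm
  | cons q qs' ih =>
    have hq := hb q (List.mem_cons_self ..)
    have hcast : (q : Int) - (k : Int) = ((q - k : Nat) : Int) := by omega
    have hlen : q - k < t.length := hq.2
    have hone : (k : Int) + 1 = ((k + 1 : Nat) : Int) := by omega
    rw [List.foldl_cons]
    have hstep :
        (match PySem.List.pop? (t, (k : Int)).1 ((q : Int) - (t, (k : Int)).2) with
          | some r => (r.2, (t, (k : Int)).2 + 1)
          | none => ((t, (k : Int)).1, (t, (k : Int)).2 + 1))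
        = (t.eraseIdx (q - k), ((k + 1 : Nat) : Int)) := by
      show (match PySem.List.pop? t ((q : Int) - (k : Int)) with
          | some r => (r.2, (k : Int) + 1)
          | none => (t, (k : Int) + 1)) = _
      rw [hcast, PySem.List.pop?_natCast t (q - k) hlen, hone]
    rw [hstep, ih (t.eraseIdx (q - k)) (k + 1) hp.of_cons]
    · rw [pvKeep_erase q qs' k t hq.1 hq.2 (fun x hx => List.rel_of_pairwise_cons hp hx)]
    · intro q' hq'
      have hlt := List.rel_of_pairwise_cons hp hq'
      have := (hb q' (List.mem_cons_of_mem _ hq')).2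
      rw [List.length_eraseIdx, if_pos hlen]
      omega

theorem pvMem (text : List String) (j : Nat) (hj : j < text.length) :
    (PySem.List.pyGetD text (j : Int) "" = "." ∧ 1 ≤ (j : Int) ∧
      (j : Int) ≤ (text.length : Int) - 2 ∧ PySem.List.pyGetD text ((j : Int) - 1) "" = ".")
    ↔ j ∈ pvQs text := by
  by_cases hj0 : j = 0
  · subst hj0
    simp [pvQs, pvRem, List.mem_filter]
  · have h1 : (1 : Nat) ≤ j := by omega
    have hc : ((j : Int)) - 1 = ((j - 1 : Nat) : Int) := by omega
    rw [hc, PySem.List.pyGetD_natCast, PySem.List.pyGetD_natCast]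
    simp only [pvQs, List.mem_filter, List.mem_range, pvRem, pvDot, Bool.and_eq_true,
      decide_eq_true_eq]
    constructor
    · rintro ⟨hd, _, hle, hp⟩
      exact ⟨by omega, ⟨hd, h1⟩, hp⟩
    · rintro ⟨hlt, ⟨hd, _⟩, hp⟩
      exact ⟨hd, by exact_mod_cast h1, by omega, hp⟩

theorem pvBfold (text : List String) (l : List String) (j : Nat) (acc : List String)
    (h : text.drop j = l) :
    (List.range' j l.length).foldl
      (fun res (i : Nat) =>
        if ¬ (PySem.List.pyGetD text (i : Int) "" = "." ∧ 1 ≤ (i : Int) ∧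
              (i : Int) ≤ (text.length : Int) - 2 ∧ PySem.List.pyGetD text ((i : Int) - 1) "" = ".")
        then res ++ [PySem.List.pyGetD text (i : Int) ""] else res) acc
    = acc ++ pvKeep (pvQs text) j l := by
  induction l generalizing j acc with
  | nil => simp [pvKeep]
  | cons x xs ih =>
    have hj : j < text.length := by
      by_contra hge
      rw [List.drop_eq_nil_of_le (by omega)] at h
      simp at h
    have hx : text[j]? = some x := by
      have h0 : (text.drop j)[0]? = text[j + 0]? := List.getElem?_drop
      rw [h] at h0
      simpa using h0.symm
    have hget : PySem.List.pyGetD text (j : Int) "" = x := by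
      rw [PySem.List.pyGetD_natCast, List.getD_eq_getElem?_getD, hx]
      rfl
    have h' : text.drop (j + 1) = xs := by
      rw [← List.drop_drop, h]
      rfl
    rw [List.length_cons, List.range'_succ, List.foldl_cons]
    by_cases hc : j ∈ pvQs text
    · rw [if_neg (by simpa using (pvMem text j hj).mpr hc), ih _ _ h']
      simp only [pvKeep, if_pos hc]
    · rw [if_pos (by simpa using fun hcond => hc ((pvMem text j hj).mp hcond)), hget, ih _ _ h']
      simp only [pvKeep, if_neg hc, List.append_assoc, List.singleton_append]

theorem pvA_eq (text : List String) : degree_3 text = pvKeep (pvQs text) 0 text := by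
  simp only [degree_3]
  rw [PySem.List.pyRange_one]
  have htn : ((text.length : Int) - 1 - 0).toNat = text.length - 1 := by omega
  simp only [zero_add, htn]
  rw [pvLoop1 text (text.length - 1)]
  rw [PySem.List.foldl_pyRange_zero_pyGetD'
    (((List.range (text.length - 1)).filter (pvRem text)).map (fun (k : Nat) => (k : Int))) 0
    (fun (st : List String × Int) (a : Int) =>
      match PySem.List.pop? st.1 (a - st.2) with
      | some r => (r.2, st.2 + 1)
      | none => (st.1, st.2 + 1))
    (text, 0)]
  rw [List.foldl_map]
  have h0 : ((0 : Nat) : Int) = (0 : Int) := rfl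
  rw [show (pvQs text) = (List.range (text.length - 1)).filter (pvRem text) from rfl] at *
  have := pvPopFold ((List.range (text.length - 1)).filter (pvRem text)) text 0
    (List.Pairwise.filter _ List.pairwise_lt_range)
    (by
      intro q hq
      have := List.mem_range.mp (List.mem_filter.mp hq).1
      omega)
  rw [h0] at this
  exact this

theorem pvB_eq (text : List String) : degree_3_alt text = pvKeep (pvQs text) 0 text := by
  simp only [degree_3_alt]
  rw [PySem.List.pyRange_one]
  have htn : ((text.length : Int) - 0).toNat = text.length := by omega
  simp only [zero_add, htn]
  rw [List.foldl_map, List.range_eq_range']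
  have := pvBfold text text 0 [] rfl
  simpa using this

-- ===== VERDICT (by name: the statement is the Claim_ definition above) =====
theorem degree_3_spec : Claim_equal_degree_3 := by
  intro text _
  unfold Spec_degree_3
  rw [pvA_eq, pvB_eq]
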